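-- pv_equiv track=rewrite | github.com/utra-robosoccer/soccerbot | soccer_object_localization/src/soccer_object_localization/detector_goalpost.py | cluster_vlines
-- ===== SOURCE A (Python) =====
-- def cluster_vlines(vlines, max_y_gap, min_x_gap):
--     """Arrange sorted vertical line data into groups where successive elements
--     must have similar y values and a gap between their x values
--     Based on: https://stackoverflow.com/questions/14783947/grouping-clustering-numbers-in-python
--     """
--     groups = [[vlines[0]]]
--     for d in vlines[1:]:
--         is_x1s_dissimilar = abs(d["x1"] - groups[-1][-1]["x1"]) >= min_x_gap
--         is_y1s_similar = abs(d["y1"] - groups[-1][-1]["y1"]) <= max_y_gap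
--         is_y2s_similar = abs(d["y2"] - groups[-1][-1]["y2"]) <= max_y_gap
--         is_x2s_dissimilar = abs(d["x2"] - groups[-1][-1]["x2"]) >= min_x_gap
--         if is_x1s_dissimilar and is_y1s_similar and is_x2s_dissimilar and is_y2s_similar:
--             groups[-1].append(d)
--         else:
--             groups.append([d])
--     return groups
-- ===== SOURCE B (Python) =====
-- def cluster_vlines(vlines, max_y_gap, min_x_gap):
--     # Two staged passes instead of a single accumulator scan:
--     # (1) compute the break positions (indices where a new group starts),
--     # (2) cut vlines into contiguous slices at those positions.
--     def ok(a, b):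
--         return (abs(a["x1"] - b["x1"]) >= min_x_gap
--                 and abs(a["y1"] - b["y1"]) <= max_y_gap
--                 and abs(a["x2"] - b["x2"]) >= min_x_gap
--                 and abs(a["y2"] - b["y2"]) <= max_y_gap)
--
--     breaks = [i + 1 for i, (a, b) in enumerate(zip(vlines, vlines[1:])) if not ok(a, b)]
--     bounds = [0] + breaks + [len(vlines)]
--     return [vlines[s:e] for s, e in zip(bounds, bounds[1:])]
-- ===== Notes on version B (the rewrite author's own statement) =====
-- stated objective: alternative
-- what changed: B replaces A's single accumulator scan that mutates the last group with two staged passes: it first computes the list of break indices from enumerate(zip(vlines, vlines[1:])), then cuts vlines into contiguous slices at those boundaries.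
import Mathlib
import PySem

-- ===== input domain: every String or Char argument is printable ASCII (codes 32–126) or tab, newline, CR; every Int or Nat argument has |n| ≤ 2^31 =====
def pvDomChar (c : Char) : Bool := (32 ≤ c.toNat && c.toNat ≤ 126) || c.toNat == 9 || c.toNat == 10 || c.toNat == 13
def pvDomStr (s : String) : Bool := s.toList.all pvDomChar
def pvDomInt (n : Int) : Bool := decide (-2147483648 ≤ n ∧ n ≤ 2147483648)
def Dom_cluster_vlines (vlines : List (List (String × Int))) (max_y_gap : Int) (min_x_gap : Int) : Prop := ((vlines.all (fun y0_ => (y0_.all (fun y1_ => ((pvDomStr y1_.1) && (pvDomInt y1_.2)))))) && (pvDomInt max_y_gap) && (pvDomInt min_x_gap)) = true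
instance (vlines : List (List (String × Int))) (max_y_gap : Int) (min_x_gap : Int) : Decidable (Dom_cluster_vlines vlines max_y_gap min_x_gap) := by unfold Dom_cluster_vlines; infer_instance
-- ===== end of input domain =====

-- B replaces A's single accumulator scan with two staged passes (break indices, then slicing);
-- same O(n) cost, a different decomposition of the task.


-- d["k"] for an association-list dict: first match, default 0 (Pre_ guarantees the key is present,
-- so the default is never reached on admitted inputs; a missing key is a Python KeyError, excluded by Pre_)
def pvKey (d : List (String × Int)) (k : String) : Int :=
  (PySem.Dict.mk d).getD k 0

-- ===== PORT A =====
def cluster_vlines (vlines : List (List (String × Int))) (max_y_gap : Int) (min_x_gap : Int) : List (List (List (String × Int))) :=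
  match vlines with
  | [] => []  -- Python raises IndexError on vlines[0]; excluded by Pre_
  | v0 :: rest =>
    rest.foldl (fun groups d =>
      let lastg := (groups.getLast?).getD []      -- groups[-1]
      let prev := (lastg.getLast?).getD []        -- groups[-1][-1]
      let is_x1s_dissimilar := decide (min_x_gap ≤ |pvKey d "x1" - pvKey prev "x1"|)
      let is_y1s_similar := decide (|pvKey d "y1" - pvKey prev "y1"| ≤ max_y_gap)
      let is_y2s_similar := decide (|pvKey d "y2" - pvKey prev "y2"| ≤ max_y_gap)
      let is_x2s_dissimilar := decide (min_x_gap ≤ |pvKey d "x2" - pvKey prev "x2"|)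
      if is_x1s_dissimilar && is_y1s_similar && is_x2s_dissimilar && is_y2s_similar
      then groups.dropLast ++ [lastg ++ [d]]      -- groups[-1].append(d)
      else groups ++ [[d]]                        -- groups.append([d])
    ) [[v0]]

-- ===== PORT B =====
-- ok(a, b) of Source B (a the earlier element, b its successor)
def pvOk (max_y_gap min_x_gap : Int) (a b : List (String × Int)) : Bool :=
  decide (min_x_gap ≤ |pvKey a "x1" - pvKey b "x1"|) &&
  decide (|pvKey a "y1" - pvKey b "y1"| ≤ max_y_gap) &&
  decide (min_x_gap ≤ |pvKey a "x2" - pvKey b "x2"|) &&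
  decide (|pvKey a "y2" - pvKey b "y2"| ≤ max_y_gap)

def cluster_vlines_alt (vlines : List (List (String × Int))) (max_y_gap : Int) (min_x_gap : Int) : List (List (List (String × Int))) :=
  -- breaks = [i + 1 for i, (a, b) in enumerate(zip(vlines, vlines[1:])) if not ok(a, b)]
  let breaks : List Int :=
    (PySem.List.enumerate (vlines.zip (PySem.List.slice vlines (some 1) none)) 0).filterMap
      (fun p => if ! pvOk max_y_gap min_x_gap p.2.1 p.2.2 then some (p.1 + 1) else none)
  -- bounds = [0] + breaks + [len(vlines)]
  let bounds : List Int := [0] ++ breaks ++ [(vlines.length : Int)]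
  -- [vlines[s:e] for s, e in zip(bounds, bounds[1:])]
  (bounds.zip (bounds.drop 1)).map (fun se => PySem.List.slice vlines (some se.1) (some se.2))

-- ===== PRECONDITION & SPEC =====
-- Pre_ excludes exactly the inputs where Python A raises: the empty list (IndexError on vlines[0]),
-- and lists of length ≥ 2 containing a dict missing one of the keys "x1","y1","x2","y2" (KeyError;
-- with a single element the loop body never runs, so no key is ever looked up).
def Pre_cluster_vlines (vlines : List (List (String × Int))) (max_y_gap : Int) (min_x_gap : Int) : Prop :=
  vlines ≠ [] ∧ (2 ≤ vlines.length → ∀ d ∈ vlines,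
    (PySem.Dict.mk d).contains "x1" = true ∧ (PySem.Dict.mk d).contains "y1" = true ∧
    (PySem.Dict.mk d).contains "x2" = true ∧ (PySem.Dict.mk d).contains "y2" = true)
instance (vlines : List (List (String × Int))) (max_y_gap : Int) (min_x_gap : Int) : Decidable (Pre_cluster_vlines vlines max_y_gap min_x_gap) := by unfold Pre_cluster_vlines; infer_instance

def pvWitness_cluster_vlines : (List (List (String × Int))) × Int × Int :=
  ([[("x1", 0), ("y1", 0), ("x2", 10), ("y2", 0)], [("x1", 5), ("y1", 1), ("x2", 15), ("y2", 1)]], 2, 3)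

def Spec_cluster_vlines (vlines : List (List (String × Int))) (max_y_gap : Int) (min_x_gap : Int) (out : List (List (List (String × Int)))) : Prop := out = cluster_vlines_alt vlines max_y_gap min_x_gap
instance (vlines : List (List (String × Int))) (max_y_gap : Int) (min_x_gap : Int) (out : List (List (List (String × Int)))) : Decidable (Spec_cluster_vlines vlines max_y_gap min_x_gap out) := by unfold Spec_cluster_vlines; infer_instance

-- ===== CLAIM (what is proved, stated in full; the proofs are below) =====
def Claim_equal_cluster_vlines : Prop := ∀ (vlines : List (List (String × Int))) (max_y_gap : Int) (min_x_gap : Int), Dom_cluster_vlines vlines max_y_gap min_x_gap → Pre_cluster_vlines vlines max_y_gap min_x_gap → Spec_cluster_vlines vlines max_y_gap min_x_gap (cluster_vlines vlines max_y_gap min_x_gap)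

-- ===== LEMMAS AND PROOFS =====

-- The grouping predicate, oriented as A computes it: pvP g x prev d tests d against prev.
def pvP (g x : Int) (a b : List (String × Int)) : Bool :=
  decide (x ≤ |pvKey b "x1" - pvKey a "x1"|) &&
  decide (|pvKey b "y1" - pvKey a "y1"| ≤ g) &&
  decide (x ≤ |pvKey b "x2" - pvKey a "x2"|) &&
  decide (|pvKey b "y2" - pvKey a "y2"| ≤ g)

lemma pvOk_eq_pvP (g x : Int) (a b : List (String × Int)) : pvOk g x a b = pvP g x a b := by
  unfold pvOk pvP
  rw [abs_sub_comm (pvKey b "x1") (pvKey a "x1"), abs_sub_comm (pvKey b "y1") (pvKey a "y1"),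
      abs_sub_comm (pvKey b "x2") (pvKey a "x2"), abs_sub_comm (pvKey b "y2") (pvKey a "y2")]

-- A's loop body, with the condition folded into pvP (definitionally equal to the lambda in the port)
def pvStepA (g x : Int) (groups : List (List (List (String × Int)))) (d : List (String × Int)) :
    List (List (List (String × Int))) :=
  let lastg := (groups.getLast?).getD []
  let prev := (lastg.getLast?).getD []
  if pvP g x prev d then groups.dropLast ++ [lastg ++ [d]] else groups ++ [[d]]

-- Reference clustering: split rest into (h, t) — h extends the chunk ending at prev, t the later chunks.
def pvSplit (p : List (String × Int) → List (String × Int) → Bool) :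
    List (String × Int) → List (List (String × Int)) →
    List (List (String × Int)) × List (List (List (String × Int)))
  | _, [] => ([], [])
  | prev, d :: rest =>
    let s := pvSplit p d rest
    if p prev d then (d :: s.1, s.2) else ([], (d :: s.1) :: s.2)

def pvChunks (p : List (String × Int) → List (String × Int) → Bool) :
    List (List (String × Int)) → List (List (List (String × Int)))
  | [] => []
  | v :: rest => (v :: (pvSplit p v rest).1) :: (pvSplit p v rest).2

-- ---------- A's fold computes pvChunks ----------
lemma A_inv (g x : Int) :
    ∀ (rest : List (List (String × Int))) (gs : List (List (List (String × Int))))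
      (lg : List (List (String × Int))) (prev : List (String × Int)),
    rest.foldl (pvStepA g x) (gs ++ [lg ++ [prev]])
    = gs ++ ((lg ++ prev :: (pvSplit (pvP g x) prev rest).1) :: (pvSplit (pvP g x) prev rest).2) := by
  intro rest
  induction rest with
  | nil => intro gs lg prev; simp [pvSplit]
  | cons d rest ih =>
    intro gs lg prev
    rw [List.foldl_cons]
    have hstep : pvStepA g x (gs ++ [lg ++ [prev]]) d
        = if pvP g x prev d then gs ++ [(lg ++ [prev]) ++ [d]] else (gs ++ [lg ++ [prev]]) ++ [[d]] := by
      simp [pvStepA]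
    rw [hstep]
    by_cases h : pvP g x prev d
    · rw [if_pos h]
      have ih' := ih gs (lg ++ [prev]) d
      rw [ih']
      simp [pvSplit, h]
    · rw [if_neg h]
      have ih' := ih (gs ++ [lg ++ [prev]]) [] d
      rw [show (gs ++ [lg ++ [prev]]) ++ [[d]] = (gs ++ [lg ++ [prev]]) ++ [[] ++ [d]] by simp]
      rw [ih']
      simp [pvSplit, h]

lemma A_eq_chunks (g x : Int) (vlines : List (List (String × Int))) :
    cluster_vlines vlines g x = pvChunks (pvP g x) vlines := by
  cases vlines with
  | nil => rfl
  | cons v0 rest =>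
    show rest.foldl (pvStepA g x) [[v0]] = _
    have h := A_inv g x rest [] [] v0
    simpa [pvChunks] using h

-- ---------- B-side: breaks, bounds, slices ----------
-- break positions of prev :: l, prev sitting at index i
def pvBrks (g x : Int) : List (String × Int) → List (List (String × Int)) → Int → List Int
  | _, [], _ => []
  | prev, d :: l, i =>
    if pvP g x prev d then pvBrks g x d l (i + 1) else (i + 1) :: pvBrks g x d l (i + 1)

-- start indices of a list of chunks, the first starting at s
def pvStarts (s : Int) : List (List (List (String × Int))) → List Int
  | [] => []
  | c :: cs => s :: pvStarts (s + c.length) cs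

-- B's comprehension computes pvBrks
lemma brks_eq (g x : Int) :
    ∀ (l : List (List (String × Int))) (prev : List (String × Int)) (i : Int),
    (PySem.List.enumerate ((prev :: l).zip l) i).filterMap
      (fun p => if ! pvOk g x p.2.1 p.2.2 then some (p.1 + 1) else none)
    = pvBrks g x prev l i := by
  intro l
  induction l with
  | nil => intro prev i; rfl
  | cons d l ih =>
    intro prev i
    rw [show (prev :: d :: l).zip (d :: l) = (prev, d) :: ((d :: l).zip l) by rfl]
    rw [PySem.List.enumerate_cons]
    by_cases h : pvP g x prev d
    · rw [List.filterMap_cons_none (by simp [pvOk_eq_pvP, h])]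
      rw [ih d (i + 1)]
      simp [pvBrks, h]
    · rw [List.filterMap_cons_some (by simp [pvOk_eq_pvP, h] : _ = some (i + 1))]
      rw [ih d (i + 1)]
      simp [pvBrks, h]

-- breaks are the start indices of the chunks after the first
lemma brks_starts (g x : Int) :
    ∀ (l : List (List (String × Int))) (prev : List (String × Int)) (o : Int),
    pvBrks g x prev l o
      = pvStarts (o + 1 + ((pvSplit (pvP g x) prev l).1.length : Int)) (pvSplit (pvP g x) prev l).2 := by
  intro l
  induction l with
  | nil => intro prev o; simp [pvBrks, pvSplit, pvStarts]
  | cons d l ih =>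
    intro prev o
    by_cases h : pvP g x prev d
    · simp only [pvBrks, pvSplit, h, if_true]
      rw [ih d (o + 1)]
      congr 1
      simp only [List.length_cons]
      push_cast
      ring
    · simp only [pvBrks, h, pvSplit]
      rw [if_neg (by simp [h]), if_neg (by simp [h])]
      rw [ih d (o + 1)]
      simp only [pvStarts, List.length_nil]
      congr 1
      · push_cast; ring
      · congr 1
        simp only [List.length_cons]
        push_cast
        omega

-- the chunks flatten back to the input
lemma split_join (g x : Int) :
    ∀ (l : List (List (String × Int))) (prev : List (String × Int)),
    (prev :: (pvSplit (pvP g x) prev l).1) ++ ((pvSplit (pvP g x) prev l).2).flatten = prev :: l := by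
  intro l
  induction l with
  | nil => intro prev; simp [pvSplit]
  | cons d l ih =>
    intro prev
    by_cases h : pvP g x prev d
    · simp only [pvSplit, h, if_true]
      have := ih d
      simpa using this
    · simp only [pvSplit, h]
      rw [if_neg (by simp [h])]
      have := ih d
      simp only [List.cons_append, List.flatten_cons] at this ⊢
      simp at this ⊢
      exact this

-- slicing a list at the start indices of a flattening recovers the chunks
lemma slices_eq :
    ∀ (cs : List (List (List (String × Int)))) (s : Nat) (xs : List (List (String × Int))),
    xs.drop s = cs.flatten → xs.length = s + cs.flatten.length →
    ((( pvStarts (s : Int) cs ++ [(xs.length : Int)]).zip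
        ((pvStarts (s : Int) cs ++ [(xs.length : Int)]).drop 1)).map
      (fun se => PySem.List.slice xs (some se.1) (some se.2))) = cs := by
  intro cs
  induction cs with
  | nil => intro s xs _ _; rfl
  | cons c cs ih =>
    intro s xs hdrop hlen
    have hc : xs.drop s = c ++ cs.flatten := by simpa using hdrop
    have hdrop' : xs.drop (s + c.length) = cs.flatten := by
      rw [← List.drop_drop, hc]
      simp
    have hlen' : xs.length = (s + c.length) + cs.flatten.length := by
      simp only [List.flatten_cons, List.length_append] at hlen
      omega
    have hslice : ∀ (e : Nat), e = s + c.length →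
        PySem.List.slice xs (some (s : Int)) (some (e : Int)) = c := by
      intro e he
      rw [PySem.List.slice_natCast]
      rw [he, Nat.add_sub_cancel_left, hc]
      simp
    cases cs with
    | nil =>
      have hn : xs.length = s + c.length := by simpa using hlen
      simp only [pvStarts, List.nil_append, List.singleton_append, List.cons_append,
        List.drop_succ_cons, List.drop_zero, List.zip_cons_cons, List.zip_nil_right,
        List.map_cons, List.map_nil]
      rw [hslice xs.length hn]
    | cons c' cs' =>
      have ihres := ih (s + c.length) xs hdrop' hlen'
      simp only [pvStarts] at ihres ⊢
      rw [show ((s : Int) + (c.length : Int)) = ((s + c.length : Nat) : Int) by norm_cast] at *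
      simp only [List.cons_append, List.drop_succ_cons, List.drop_zero] at ihres ⊢
      rw [List.zip_cons_cons, List.map_cons]
      rw [hslice (s + c.length) rfl, ihres]

lemma B_eq_chunks (g x : Int) (v0 : List (String × Int)) (rest : List (List (String × Int))) :
    cluster_vlines_alt (v0 :: rest) g x = pvChunks (pvP g x) (v0 :: rest) := by
  show ((([(0 : Int)] ++ _ ++ [((v0 :: rest).length : Int)]).zip _).map _) = _
  rw [PySem.List.slice_from_one]
  rw [show (v0 :: rest).tail = rest by rfl]
  rw [brks_eq g x rest v0 0, brks_starts g x rest v0 0]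
  have hstart : (0 : Int) :: pvStarts (0 + 1 + ((pvSplit (pvP g x) v0 rest).1.length : Int))
        (pvSplit (pvP g x) v0 rest).2
      = pvStarts ((0 : Nat) : Int) ((v0 :: (pvSplit (pvP g x) v0 rest).1) :: (pvSplit (pvP g x) v0 rest).2) := by
    simp only [pvStarts]
    congr 2
    push_cast
    simp
    ring
  have hj := split_join g x rest v0
  have hdrop : (v0 :: rest).drop 0
      = ((v0 :: (pvSplit (pvP g x) v0 rest).1) :: (pvSplit (pvP g x) v0 rest).2).flatten := by
    simpa using hj.symm
  have hlen : (v0 :: rest).length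
      = 0 + ((v0 :: (pvSplit (pvP g x) v0 rest).1) :: (pvSplit (pvP g x) v0 rest).2).flatten.length := by
    rw [← hdrop]; simp
  have := slices_eq ((v0 :: (pvSplit (pvP g x) v0 rest).1) :: (pvSplit (pvP g x) v0 rest).2)
    0 (v0 :: rest) hdrop hlen
  simp only [List.singleton_append]
  rw [hstart]
  rw [this]
  rfl

-- ===== VERDICT (by name: the statement is the Claim_ definition above) =====
theorem cluster_vlines_spec : Claim_equal_cluster_vlines := by
  intro vlines g x _hdom hpre
  unfold Spec_cluster_vlines
  cases vlines with
  | nil => exact absurd rfl hpre.1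
  | cons v0 rest => rw [A_eq_chunks, B_eq_chunks]
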